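-- pv_equiv track=rewrite | github.com/ugurcan-sonmez-95/LeetCode | Algorithms/Reducing_Dishes/main.py | maxSatisfaction
-- ===== SOURCE A (Python) =====
-- from typing import List
--
-- def maxSatisfaction(satisfaction: List[int]) -> int:
--     satisfaction.sort()
--     max_sum, acc, i = 0, 0, len(satisfaction)-1
--     while (i >= 0) and (satisfaction[i]+acc > 0):
--         acc += satisfaction[i]
--         max_sum += acc
--         i -= 1
--     return max_sum
-- ===== SOURCE B (Python) =====
-- from typing import List
--
-- def maxSatisfaction(satisfaction: List[int]) -> int:
--     # Note: unlike A, B does not mutate its argument (A sorts it in place).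
--     # Brute force over the number k of dishes kept: with the k best dishes
--     # (sorted descending, best served last) the value is sum((k-i)*s[i]);
--     # recompute it from scratch for every k and take the maximum (k=0 -> 0).
--     s = sorted(satisfaction, reverse=True)
--     best = 0
--     for k in range(1, len(s) + 1):
--         best = max(best, sum((k - i) * x for i, x in enumerate(s[:k])))
--     return best
-- ===== Notes on version B (the rewrite author's own statement) =====
-- stated objective: alternative
-- what changed: Replaces A's early-breaking greedy accumulation over the sorted list with an exhaustive search over the number k of kept dishes, recomputing the time-weighted sum of the k best dishes from scratch for each k and taking the maximum; B trades A's O(n log n) single pass for an O(n^2) brute force.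
import Mathlib
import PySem

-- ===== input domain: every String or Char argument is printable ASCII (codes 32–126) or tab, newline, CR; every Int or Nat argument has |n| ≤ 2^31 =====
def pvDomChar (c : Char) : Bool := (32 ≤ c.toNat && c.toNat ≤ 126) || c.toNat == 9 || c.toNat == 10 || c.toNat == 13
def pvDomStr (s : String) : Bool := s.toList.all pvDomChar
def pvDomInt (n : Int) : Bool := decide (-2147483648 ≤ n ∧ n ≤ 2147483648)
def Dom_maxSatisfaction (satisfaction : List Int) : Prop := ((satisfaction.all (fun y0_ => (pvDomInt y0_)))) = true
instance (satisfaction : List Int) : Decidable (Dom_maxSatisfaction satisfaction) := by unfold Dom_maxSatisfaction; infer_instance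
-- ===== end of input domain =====

-- B replaces A's early-breaking greedy pass with an exhaustive search over the number k
-- of kept dishes, recomputing each candidate's time-weighted sum from scratch; equivalence
-- is about the RETURN value only (Python A sorts its argument in place, Python B does not).

-- ===== PORT A =====
-- A's while loop: i counts down from len-1; 'n' here is i+1 (n = 0 ⟺ i < 0).
def maxSatisfactionLoopA (s : List Int) : Nat → Int → Int → Int
  | 0, _, max_sum => max_sum
  | n + 1, acc, max_sum =>
    match PySem.List.pyGet? s ((n : Int)) with
    | none => max_sum  -- unreachable: n < len
    | some x =>
      if x + acc > 0 then
        maxSatisfactionLoopA s n (acc + x) (max_sum + (acc + x))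
      else
        max_sum

def maxSatisfaction (satisfaction : List Int) : Int :=
  let s := PySem.List.sorted satisfaction (fun x => x) false
  maxSatisfactionLoopA s s.length 0 0

-- ===== PORT B =====
-- sum((k - i) * x for i, x in enumerate(s[:k]))
def maxSatisfactionCandB (s : List Int) (k : Int) : Int :=
  (PySem.List.enumerate (PySem.List.slice s none (some k))).foldl
    (fun a p => a + (k - p.1) * p.2) 0

-- s = sorted(satisfaction, reverse=True); for k in range(1, len(s)+1): best = max(best, …)
def maxSatisfaction_alt (satisfaction : List Int) : Int :=
  let s := PySem.List.sorted satisfaction (fun x => x) true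
  (PySem.List.pyRange 1 ((s.length : Int) + 1) 1).foldl
    (fun best k => max best (maxSatisfactionCandB s k)) 0

-- ===== PRECONDITION & SPEC =====
def Spec_maxSatisfaction (satisfaction : List Int) (out : Int) : Prop := out = maxSatisfaction_alt satisfaction
instance (satisfaction : List Int) (out : Int) : Decidable (Spec_maxSatisfaction satisfaction out) := by unfold Spec_maxSatisfaction; infer_instance

-- ===== CLAIM =====
def Claim_equal_maxSatisfaction : Prop := ∀ (satisfaction : List Int), Dom_maxSatisfaction satisfaction → Spec_maxSatisfaction satisfaction (maxSatisfaction satisfaction)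

-- ===== LEMMAS AND PROOFS =====

-- A's loop, re-expressed as structural recursion over the descending prefix-reverse.
def greedyG : List Int → Int → Int → Int
  | [], _, ms => ms
  | x :: xs, acc, ms => if x + acc > 0 then greedyG xs (acc + x) (ms + (acc + x)) else ms

-- A one-pass suffix scan with a running maximum: the common middle ground the two
-- ports are bridged through (not a port of either).
def loopM : List Int → Int → Int → Int → Int
  | [], _, _, best => best
  | x :: xs, total, res, best =>
    loopM xs (total + x) (res + (total + x)) (max best (res + (total + x)))

-- W d k = time-weighted value of the first k elements of d (best served last).
def Wfun (d : List Int) : Nat → Int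
  | 0 => 0
  | k + 1 => Wfun d k + (d.take (k + 1)).sum

theorem loopA_eq_greedyG (s : List Int) :
    ∀ (n : Nat), n ≤ s.length → ∀ (acc ms : Int),
      maxSatisfactionLoopA s n acc ms = greedyG ((s.take n).reverse) acc ms := by
  intro n
  induction n with
  | zero => intro _ acc ms; simp [maxSatisfactionLoopA, greedyG]
  | succ k ih =>
    intro hn acc ms
    have hk : k < s.length := by omega
    have hget : PySem.List.pyGet? s ((k : Int)) = some s[k] := by
      simp [PySem.List.pyGet?_natCast, List.getElem?_eq_getElem hk]
    have htake : (s.take (k + 1)).reverse = s[k] :: (s.take k).reverse := by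
      rw [List.take_add_one, List.getElem?_eq_getElem hk]
      simp
    simp only [maxSatisfactionLoopA, hget, htake, greedyG]
    by_cases hpos : s[k] + acc > 0
    · simp only [hpos, if_pos]
      exact ih (by omega) _ _
    · rw [if_neg hpos, if_neg hpos]

-- Once the running total is ≤ 0 and every remaining element is ≤ 0, the running
-- maximum never changes.
theorem loopM_stall : ∀ (d : List Int) (total res best : Int),
    (∀ y ∈ d, y ≤ 0) → total ≤ 0 → res ≤ best →
    loopM d total res best = best := by
  intro d
  induction d with
  | nil => intro _ _ _ _ _ _; rfl
  | cons x xs ih =>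
    intro total res best hall htot hres
    have hx : x ≤ 0 := hall x (by simp)
    rw [loopM]
    have hmax : max best (res + (total + x)) = best := by omega
    rw [hmax]
    exact ih _ _ _ (fun y hy => hall y (by simp [hy])) (by omega) (by omega)

-- On a descending list, A's greedy loop equals the full suffix scan.
theorem greedyG_eq_loopM : ∀ (d : List Int),
    d.Pairwise (fun a b => b ≤ a) → ∀ (acc ms : Int), 0 ≤ acc →
    greedyG d acc ms = loopM d acc ms ms := by
  intro d
  induction d with
  | nil => intro _ acc ms _; rfl
  | cons x xs ih =>
    intro hp acc ms hacc
    have hhead : ∀ y ∈ xs, y ≤ x := (List.pairwise_cons.mp hp).1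
    have htail : xs.Pairwise (fun a b => b ≤ a) := (List.pairwise_cons.mp hp).2
    rw [greedyG, loopM]
    by_cases hpos : x + acc > 0
    · have hmax : max ms (ms + (acc + x)) = ms + (acc + x) := by omega
      rw [if_pos hpos, hmax]
      exact ih htail (acc + x) (ms + (acc + x)) (by omega)
    · have hx : x ≤ 0 := by omega
      have hmax : max ms (ms + (acc + x)) = ms := by omega
      rw [if_neg hpos, hmax]
      exact (loopM_stall xs (acc + x) (ms + (acc + x)) ms
        (fun y hy => le_trans (hhead y hy) hx) (by omega) (by omega)).symm

-- sorted descending = reverse of sorted ascending (identity key: tied elements are equal).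
theorem sorted_rev_eq_reverse (xs : List Int) :
    PySem.List.sorted xs (fun x => x) true = (PySem.List.sorted xs (fun x => x) false).reverse := by
  have hperm : ((PySem.List.sorted xs (fun x => x) true).reverse).Perm
      (PySem.List.sorted xs (fun x => x) false) :=
    ((PySem.List.sorted xs (fun x => x) true).reverse_perm.trans
      (PySem.List.sorted_perm xs (fun x => x) true)).trans
      (PySem.List.sorted_perm xs (fun x => x) false).symm
  have h := PySem.List.eq_of_perm_of_pairwise_le_of_injective (fun x : Int => x)
    (fun a b h => h) hperm
    (by
      rw [List.pairwise_reverse]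
      exact PySem.List.sorted_pairwise_rev xs (fun x => x))
    (PySem.List.sorted_pairwise xs (fun x => x))
  rw [← h, List.reverse_reverse]

-- enumerate-fold as a Finset sum.
theorem enumFold_sum (k : Int) : ∀ (l : List Int) (s0 a : Int),
    (PySem.List.enumerate l s0).foldl (fun a p => a + (k - p.1) * p.2) a
      = a + ∑ i ∈ Finset.range l.length, (k - (s0 + i)) * l.getD i 0 := by
  intro l
  induction l with
  | nil => intro s0 a; simp [PySem.List.enumerate_nil]
  | cons x xs ih =>
    intro s0 a
    rw [PySem.List.enumerate_cons, List.foldl_cons, ih (s0 + 1)]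
    rw [List.length_cons, Finset.sum_range_succ']
    simp only [List.getD_cons_succ, List.getD_cons_zero]
    push_cast
    ring_nf

-- prefix sums as Finset sums.
theorem sum_take_eq (l : List Int) : ∀ (m : Nat), m ≤ l.length →
    (l.take m).sum = ∑ i ∈ Finset.range m, l.getD i 0 := by
  intro m
  induction m with
  | zero => intro _; simp
  | succ j ih =>
    intro hm
    have hj : j < l.length := by omega
    have hsplit : l.take (j + 1) = l.take j ++ [l[j]] := by
      rw [List.take_add_one, List.getElem?_eq_getElem hj]; rfl
    rw [Finset.sum_range_succ, ← ih (by omega), hsplit, List.sum_append,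
      List.getD_eq_getElem l 0 hj]
    simp

-- B's candidate equals Wfun, for 1 ≤ k ≤ len.
theorem Wfun_eq_sum (s : List Int) : ∀ (m : Nat), m ≤ s.length →
    Wfun s m = ∑ i ∈ Finset.range m, ((m : Int) - i) * s.getD i 0 := by
  intro m
  induction m with
  | zero => intro _; simp [Wfun]
  | succ j ih =>
    intro hm
    rw [Wfun, ih (by omega), sum_take_eq s (j + 1) hm]
    have h1 : ∑ i ∈ Finset.range (j + 1), (((j : Int) + 1) - i) * s.getD i 0
        = ∑ i ∈ Finset.range (j + 1), (((j : Int) - i) * s.getD i 0 + s.getD i 0) :=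
      Finset.sum_congr rfl (by intro i _; ring)
    push_cast
    rw [h1, Finset.sum_add_distrib,
      Finset.sum_range_succ (fun i => ((j : Int) - i) * s.getD i 0)]
    simp

theorem candB_eq_Wfun (s : List Int) (k : Int) (h0 : 0 ≤ k) (hk : k.toNat ≤ s.length) :
    maxSatisfactionCandB s k = Wfun s k.toNat := by
  unfold maxSatisfactionCandB
  rw [PySem.List.slice_to s h0, enumFold_sum k (s.take k.toNat) 0 0,
    Wfun_eq_sum s k.toNat hk]
  have hlen : (s.take k.toNat).length = k.toNat := by
    rw [List.length_take]; omega
  rw [hlen]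
  have hkk : ((k.toNat : Int)) = k := Int.toNat_of_nonneg h0
  rw [hkk]
  have : ∀ i ∈ Finset.range k.toNat,
      (k - ((0 : Int) + i)) * (s.take k.toNat).getD i 0 = (k - i) * s.getD i 0 := by
    intro i hi
    have hi' : i < k.toNat := Finset.mem_range.mp hi
    have : (s.take k.toNat).getD i 0 = s.getD i 0 := by
      simp [List.getD, List.getElem?_take_of_lt hi']
    rw [this]; ring_nf
  rw [Finset.sum_congr rfl this]
  ring

-- the suffix scan equals the fold of Wfun over range(j+1, n+1).
theorem loopM_eq_fold (d : List Int) : ∀ (m j : Nat), j + m = d.length → ∀ (b : Int),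
    loopM (d.drop j) ((d.take j).sum) (Wfun d j) b
      = (PySem.List.pyRange ((j : Int) + 1) ((d.length : Int) + 1) 1).foldl
          (fun b k => max b (Wfun d k.toNat)) b := by
  intro m
  induction m with
  | zero =>
    intro j hj b
    have hje : j = d.length := by omega
    subst hje
    rw [List.drop_length, PySem.List.pyRange_one_eq_nil (by omega)]
    rfl
  | succ t ih =>
    intro j hj b
    have hjlt : j < d.length := by omega
    have hdrop : d.drop j = d[j] :: d.drop (j + 1) := List.drop_eq_getElem_cons hjlt
    have htot : (d.take j).sum + d[j] = (d.take (j + 1)).sum := by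
      have hsplit : d.take (j + 1) = d.take j ++ [d[j]] := by
        rw [List.take_add_one, List.getElem?_eq_getElem hjlt]; rfl
      rw [hsplit, List.sum_append]; simp
    have hW : Wfun d (j + 1) = Wfun d j + (d.take (j + 1)).sum := rfl
    rw [hdrop, loopM, htot, ← hW]
    rw [PySem.List.pyRange_one_cons (by omega), List.foldl_cons]
    have hcast : ((j : Int) + 1).toNat = j + 1 := by omega
    have hcast2 : ((j : Int) + 1) + 1 = (((j + 1 : Nat) : Int)) + 1 := by omega
    rw [hcast, hcast2]
    exact ih (j + 1) (by omega) _

-- ===== VERDICT =====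
theorem maxSatisfaction_spec : Claim_equal_maxSatisfaction := by
  intro satisfaction _
  unfold Spec_maxSatisfaction maxSatisfaction maxSatisfaction_alt
  have hrev := sorted_rev_eq_reverse satisfaction
  set sa := PySem.List.sorted satisfaction (fun x => x) false with hsa
  set sd := PySem.List.sorted satisfaction (fun x => x) true with hsd
  have h1 := loopA_eq_greedyG sa sa.length (le_refl _) 0 0
  rw [List.take_length] at h1
  rw [h1, ← hrev]
  have hpair : sd.Pairwise (fun a b => b ≤ a) :=
    PySem.List.sorted_pairwise_rev satisfaction (fun x => x)
  rw [greedyG_eq_loopM sd hpair 0 0 (le_refl 0)]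
  have h2 := loopM_eq_fold sd sd.length 0 (by omega) 0
  simp only [List.drop_zero, List.take_zero, List.sum_nil, Nat.cast_zero, zero_add] at h2
  have hW0 : Wfun sd 0 = 0 := rfl
  rw [hW0] at h2
  rw [h2]
  apply PySem.List.foldl_congr_mem
  intro acc k hk
  have hm := PySem.List.mem_pyRange_one.mp hk
  have h0 : (0 : Int) ≤ k := by omega
  have hkl : k.toNat ≤ sd.length := by omega
  rw [candB_eq_Wfun sd k h0 hkl]
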